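-- pv_equiv track=rewrite | github.com/rshankras/rshankras.github.io | scripts/analyze_404s.py | generate_internal_link_fixes
-- ===== SOURCE A (Python) =====
-- def generate_internal_link_fixes(broken_links):
--     """
--     Suggest fixes for broken internal links
--     """
--     suggestions = {}
--
--     for link in broken_links:
--         if link == '/progress':
--             suggestions[link] = '/timetracker-progress/'
--         elif link == '/adaptive-layout-in-ios/':
--             suggestions[link] = '/start-here/'
--         elif '/sleep-tracker/progress/2025/01/week-' in link:
--             # These are future-dated progress pages that don't exist yet
--             suggestions[link] = '/sleep-tracker/progress/'
--         elif link.startswith('/courses/'):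
--             suggestions[link] = '/start-here/'
--         elif link.startswith('/2012/') or link.startswith('/2013/'):
--             # Old dated posts - redirect to start-here or archive
--             suggestions[link] = '/start-here/'
--         else:
--             suggestions[link] = '/404.html'
--
--     return suggestions
-- ===== SOURCE B (Python) =====
-- def generate_internal_link_fixes(broken_links):
--     """Suggest fixes for broken internal links.
--
--     Staged-overwrite strategy: every link starts at the default target,
--     then rule groups are applied from lowest to highest priority over the
--     whole dict, each later pass overwriting earlier ones, so the final
--     value for a link is its highest-priority matching rule.
--     """
--     suggestions = dict.fromkeys(broken_links, '/404.html')
--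
--     # lowest priority: old dated posts and course pages
--     for link in suggestions:
--         if link.startswith(('/courses/', '/2012/', '/2013/')):
--             suggestions[link] = '/start-here/'
--
--     # future-dated sleep-tracker progress pages
--     for link in suggestions:
--         if '/sleep-tracker/progress/2025/01/week-' in link:
--             suggestions[link] = '/sleep-tracker/progress/'
--
--     # highest priority: exact-match redirects
--     if '/adaptive-layout-in-ios/' in suggestions:
--         suggestions['/adaptive-layout-in-ios/'] = '/start-here/'
--     if '/progress' in suggestions:
--         suggestions['/progress'] = '/timetracker-progress/'
--
--     return suggestions
-- ===== Notes on version B (the rewrite author's own statement) =====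
-- stated objective: alternative
-- what changed: Replaced A's per-link first-match if/elif ladder with a staged-overwrite algorithm: every link is initialized to the default target via dict.fromkeys, then rule groups are applied over the whole dict from lowest to highest priority, later passes overwriting earlier ones.
import Mathlib
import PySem

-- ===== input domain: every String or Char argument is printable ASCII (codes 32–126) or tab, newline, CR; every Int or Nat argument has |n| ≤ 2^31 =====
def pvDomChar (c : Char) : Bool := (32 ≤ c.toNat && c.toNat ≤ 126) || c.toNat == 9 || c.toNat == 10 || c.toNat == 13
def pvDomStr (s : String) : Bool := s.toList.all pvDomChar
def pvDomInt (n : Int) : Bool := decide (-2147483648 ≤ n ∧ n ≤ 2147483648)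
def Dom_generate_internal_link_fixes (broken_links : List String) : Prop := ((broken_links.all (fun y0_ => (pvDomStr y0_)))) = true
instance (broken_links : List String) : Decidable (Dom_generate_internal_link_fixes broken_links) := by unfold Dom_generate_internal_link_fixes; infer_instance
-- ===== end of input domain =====

-- B replaces A's per-link first-match ladder by staged overwrite passes (default first, then rule groups from lowest to highest priority); same cost, alternative algorithm.

-- ===== PORT A =====
def generate_internal_link_fixes (broken_links : List String) : List (String × String) :=
  (broken_links.foldl (fun (suggestions : PySem.Dict String String) link =>
      if link == "/progress" then
        suggestions.insert link "/timetracker-progress/"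
      else if link == "/adaptive-layout-in-ios/" then
        suggestions.insert link "/start-here/"
      else if PySem.Str.isIn "/sleep-tracker/progress/2025/01/week-" link then
        suggestions.insert link "/sleep-tracker/progress/"
      else if PySem.Str.startswith link "/courses/" then
        suggestions.insert link "/start-here/"
      else if PySem.Str.startswith link "/2012/" || PySem.Str.startswith link "/2013/" then
        suggestions.insert link "/start-here/"
      else
        suggestions.insert link "/404.html")
    PySem.Dict.empty).items

-- ===== PORT B =====
def generate_internal_link_fixes_alt (broken_links : List String) : List (String × String) :=
  -- suggestions = dict.fromkeys(broken_links, '/404.html')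
  let d0 : PySem.Dict String String :=
    broken_links.foldl (fun d link => d.insert link "/404.html") PySem.Dict.empty
  -- pass 1: lowest priority (course pages and old dated posts)
  let d1 := d0.keys.foldl (fun d link =>
      if PySem.Str.startswith link "/courses/" || PySem.Str.startswith link "/2012/"
         || PySem.Str.startswith link "/2013/" then
        d.insert link "/start-here/"
      else d) d0
  -- pass 2: future-dated sleep-tracker progress pages
  let d2 := d1.keys.foldl (fun d link =>
      if PySem.Str.isIn "/sleep-tracker/progress/2025/01/week-" link then
        d.insert link "/sleep-tracker/progress/"
      else d) d1
  -- highest priority: exact-match redirects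
  let d3 := if d2.contains "/adaptive-layout-in-ios/" then
      d2.insert "/adaptive-layout-in-ios/" "/start-here/" else d2
  let d4 := if d3.contains "/progress" then
      d3.insert "/progress" "/timetracker-progress/" else d3
  d4.items

-- ===== PRECONDITION & SPEC =====
def Spec_generate_internal_link_fixes (broken_links : List String) (out : List (String × String)) : Prop := out = generate_internal_link_fixes_alt broken_links
instance (broken_links : List String) (out : List (String × String)) : Decidable (Spec_generate_internal_link_fixes broken_links out) := by unfold Spec_generate_internal_link_fixes; infer_instance

-- ===== CLAIM (what is proved, stated in full; the proofs are below) =====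
def Claim_equal_generate_internal_link_fixes : Prop := ∀ (broken_links : List String), Dom_generate_internal_link_fixes broken_links → Spec_generate_internal_link_fixes broken_links (generate_internal_link_fixes broken_links)

-- ===== LEMMAS AND PROOFS =====

-- A's classification of a single link (the value its ladder assigns)
def gilfA (link : String) : String :=
  if link == "/progress" then "/timetracker-progress/"
  else if link == "/adaptive-layout-in-ios/" then "/start-here/"
  else if PySem.Str.isIn "/sleep-tracker/progress/2025/01/week-" link then "/sleep-tracker/progress/"
  else if PySem.Str.startswith link "/courses/" then "/start-here/"
  else if PySem.Str.startswith link "/2012/" || PySem.Str.startswith link "/2013/" then "/start-here/"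
  else "/404.html"

-- a fold of inserts whose value depends only on the key: final lookup
theorem getD_foldl_insert_fun (g : String → String) (l : List String) :
    ∀ (d : PySem.Dict String String) (k dflt : String),
      (l.foldl (fun d a => d.insert a (g a)) d).getD k dflt
        = if k ∈ l then g k else d.getD k dflt := by
  induction l with
  | nil => intro d k dflt; simp [List.foldl]
  | cons x l ih =>
    intro d k dflt
    simp only [List.foldl, ih, PySem.Dict.getD_insert, List.mem_cons]
    by_cases hl : k ∈ l
    · simp [hl]
    · by_cases hx : k = x <;> simp [hl, hx]

-- a conditional-overwrite pass: final lookup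
theorem getD_pass (p : String → Bool) (v : String) (l : List String) :
    ∀ (d : PySem.Dict String String) (k dflt : String),
      (l.foldl (fun d a => if p a then d.insert a v else d) d).getD k dflt
        = if k ∈ l ∧ p k then v else d.getD k dflt := by
  induction l with
  | nil => intro d k dflt; simp [List.foldl]
  | cons x l ih =>
    intro d k dflt
    simp only [List.foldl, List.mem_cons]
    rw [ih]
    by_cases hx : k = x
    · subst hx
      by_cases hp : p k = true <;> by_cases hl : k ∈ l <;>
        simp_all [PySem.Dict.getD_insert_self]
    · have hstep : (if p x = true then d.insert x v else d).getD k dflt = d.getD k dflt := by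
        split
        · rw [PySem.Dict.getD_insert, if_neg hx]
        · rfl
      by_cases hp : p k = true <;> by_cases hl : k ∈ l <;> simp_all

-- a conditional-overwrite pass over keys already present keeps the key list
theorem keys_pass (p : String → Bool) (v : String) (l : List String) :
    ∀ (d : PySem.Dict String String), (∀ a ∈ l, a ∈ d.keys) →
      (l.foldl (fun d a => if p a then d.insert a v else d) d).keys = d.keys := by
  induction l with
  | nil => intro d _; rfl
  | cons x l ih =>
    intro d hsub
    have hx : x ∈ d.keys := hsub x (List.mem_cons_self ..)
    have hstep : (if p x then d.insert x v else d).keys = d.keys := by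
      split
      · exact PySem.Dict.keys_insert_of_contains _ _
          ((PySem.Dict.contains_iff_mem_keys _ _).mpr hx)
      · rfl
    simp only [List.foldl]
    rw [ih _ (fun a ha => by rw [hstep]; exact hsub a (List.mem_cons_of_mem _ ha)), hstep]

theorem generate_internal_link_fixes_spec : Claim_equal_generate_internal_link_fixes := by
  intro bl _
  show generate_internal_link_fixes bl = generate_internal_link_fixes_alt bl
  unfold generate_internal_link_fixes generate_internal_link_fixes_alt
  -- A's fold step is an insert of the classified value
  have hstepA : (fun (d : PySem.Dict String String) link =>
      if link == "/progress" then d.insert link "/timetracker-progress/"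
      else if link == "/adaptive-layout-in-ios/" then d.insert link "/start-here/"
      else if PySem.Str.isIn "/sleep-tracker/progress/2025/01/week-" link then d.insert link "/sleep-tracker/progress/"
      else if PySem.Str.startswith link "/courses/" then d.insert link "/start-here/"
      else if PySem.Str.startswith link "/2012/" || PySem.Str.startswith link "/2013/" then d.insert link "/start-here/"
      else d.insert link "/404.html")
      = fun d link => d.insert link (gilfA link) := by
    funext d link; unfold gilfA; split_ifs <;> rfl
  rw [hstepA]
  set dA := bl.foldl (fun (d : PySem.Dict String String) link => d.insert link (gilfA link)) PySem.Dict.empty with hdA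
  set d0 := bl.foldl (fun (d : PySem.Dict String String) link => d.insert link "/404.html") PySem.Dict.empty with hd0
  -- keys of the two initial folds
  have hkA : dA.keys = PySem.Set.ofList bl := by
    rw [hdA, PySem.Dict.keys_foldl_insert, PySem.Dict.keys_empty, PySem.Set.update_nil_left]
  have hk0 : d0.keys = PySem.Set.ofList bl := by
    rw [hd0, PySem.Dict.keys_foldl_insert, PySem.Dict.keys_empty, PySem.Set.update_nil_left]
  set p1 := fun link => PySem.Str.startswith link "/courses/" || PySem.Str.startswith link "/2012/"
         || PySem.Str.startswith link "/2013/" with hp1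
  set p2 := fun link => PySem.Str.isIn "/sleep-tracker/progress/2025/01/week-" link with hp2
  set d1 := d0.keys.foldl (fun d link => if p1 link then d.insert link "/start-here/" else d) d0 with hd1
  have hk1 : d1.keys = d0.keys := keys_pass _ _ _ _ (fun a ha => ha)
  set d2 := d1.keys.foldl (fun d link => if p2 link then d.insert link "/sleep-tracker/progress/" else d) d1 with hd2
  have hk2 : d2.keys = d1.keys := keys_pass _ _ _ _ (fun a ha => ha)
  have hmem2 : ∀ s : String, d2.contains s = true ↔ s ∈ bl := by
    intro s
    rw [PySem.Dict.contains_iff_mem_keys, hk2, hk1, hk0]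
    exact PySem.Set.mem_ofList bl s
  set d3 := if d2.contains "/adaptive-layout-in-ios/" then
      d2.insert "/adaptive-layout-in-ios/" "/start-here/" else d2 with hd3
  have hk3 : d3.keys = d2.keys := by
    rw [hd3]; split
    · exact PySem.Dict.keys_insert_of_contains _ _ (by assumption)
    · rfl
  have hmem3 : ∀ s : String, d3.contains s = true ↔ s ∈ bl := by
    intro s
    rw [PySem.Dict.contains_iff_mem_keys, hk3, hk2, hk1, hk0]
    exact PySem.Set.mem_ofList bl s
  set d4 := if d3.contains "/progress" then
      d3.insert "/progress" "/timetracker-progress/" else d3 with hd4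
  have hk4 : d4.keys = d3.keys := by
    rw [hd4]; split
    · exact PySem.Dict.keys_insert_of_contains _ _ (by assumption)
    · rfl
  -- lookups agree on every key of bl
  have hget : ∀ k ∈ bl, d4.getD k "" = gilfA k := by
    intro k hk
    have hmem0 : k ∈ d0.keys := by
      rw [hk0]; exact (PySem.Set.mem_ofList bl k).mpr hk
    have hmem1 : k ∈ d1.keys := by rw [hk1]; exact hmem0
    have hg4 : d4.getD k ""
        = if k = "/progress" then "/timetracker-progress/" else d3.getD k "" := by
      rw [hd4]
      by_cases he : k = "/progress"
      · subst he
        rw [if_pos ((hmem3 _).mpr hk), if_pos rfl, PySem.Dict.getD_insert, if_pos rfl]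
      · rw [if_neg he]
        split
        · rw [PySem.Dict.getD_insert, if_neg he]
        · rfl
    have hg3 : d3.getD k ""
        = if k = "/adaptive-layout-in-ios/" then "/start-here/" else d2.getD k "" := by
      rw [hd3]
      by_cases he : k = "/adaptive-layout-in-ios/"
      · subst he
        rw [if_pos ((hmem2 _).mpr hk), if_pos rfl, PySem.Dict.getD_insert, if_pos rfl]
      · rw [if_neg he]
        split
        · rw [PySem.Dict.getD_insert, if_neg he]
        · rfl
    rw [hg4, hg3]
    rw [hd2, getD_pass]
    simp only [eq_true hmem1, true_and]
    rw [hd1, getD_pass]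
    simp only [eq_true hmem0, true_and]
    rw [hd0, getD_foldl_insert_fun, if_pos hk]
    unfold gilfA
    simp only [hp1, hp2]
    by_cases e1 : k = "/progress"
    · rw [if_pos e1, if_pos (show (k == "/progress") = true by simp [e1])]
    · rw [if_neg e1, if_neg (show ¬ (k == "/progress") = true by simp [e1])]
      by_cases e2 : k = "/adaptive-layout-in-ios/"
      · rw [if_pos e2, if_pos (show (k == "/adaptive-layout-in-ios/") = true by simp [e2])]
      · rw [if_neg e2, if_neg (show ¬ (k == "/adaptive-layout-in-ios/") = true by simp [e2])]
        by_cases s2 : PySem.Str.isIn "/sleep-tracker/progress/2025/01/week-" k = true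
        · rw [if_pos s2, if_pos s2]
        · rw [if_neg s2, if_neg s2]
          by_cases c : PySem.Str.startswith k "/courses/" = true
          · rw [if_pos (show (PySem.Str.startswith k "/courses/" || PySem.Str.startswith k "/2012/"
                || PySem.Str.startswith k "/2013/") = true by
                    simp only [Bool.or_eq_true]; exact Or.inl (Or.inl c)), if_pos c]
          · by_cases w : (PySem.Str.startswith k "/2012/" || PySem.Str.startswith k "/2013/") = true
            · rw [if_pos (show (PySem.Str.startswith k "/courses/" || PySem.Str.startswith k "/2012/"
                  || PySem.Str.startswith k "/2013/") = true by
                    simp only [Bool.or_eq_true] at w ⊢; tauto), if_neg c, if_pos w]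
            · rw [if_neg (show ¬ (PySem.Str.startswith k "/courses/" || PySem.Str.startswith k "/2012/"
                  || PySem.Str.startswith k "/2013/") = true by
                    simp only [Bool.or_eq_true, not_or] at w c ⊢; tauto), if_neg c, if_neg w]
  -- nodup keys on both sides, then compare the items lists pointwise
  have hndA : dA.keys.Nodup := by rw [hkA]; exact PySem.Set.nodup_ofList bl
  have hnd4 : d4.keys.Nodup := by
    rw [hk4, hk3, hk2, hk1, hk0]; exact PySem.Set.nodup_ofList bl
  have hgetA : ∀ k ∈ bl, dA.getD k "" = gilfA k := by
    intro k hk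
    rw [hdA, getD_foldl_insert_fun, if_pos hk]
  rw [PySem.Dict.items_eq_map_keys dA hndA "", PySem.Dict.items_eq_map_keys d4 hnd4 "",
      hkA, hk4, hk3, hk2, hk1, hk0]
  apply List.map_congr_left
  intro k hkmem
  have hk : k ∈ bl := (PySem.Set.mem_ofList bl k).mp hkmem
  rw [hgetA k hk, hget k hk]
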